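-- pv_equiv track=rewrite | github.com/Rashadreigns123/Tarento-batch-2020-2021 | interleaving.py | interleaved
-- ===== SOURCE A (Python) =====
-- def interleaved(A,B,C, D):
--
-- 	# return true if we have reached end of all Strings
-- 	if not A and not B and not C and not D:
-- 		return True
--
-- 	# return false if we have reached the end of D
-- 	# but A or B or C are not empty
-- 	if not D:
-- 		return False
--
-- 	# if A is not empty and its first character matches with
-- 	# first character of D, recur for remaining substring
-- 	if A and D[0] == A[0]:
-- 		return interleaved(A[1:], B,C,D[1:])
--
-- 	# if B is not empty and its first character matches with
-- 	# first character of D, recur for remaining substring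
-- 	if B and D[0] == B[0]:
-- 		return interleaved(A, B[1:], C,D[1:])
--
-- 	# if C is not empty and its first character matches with
-- 	# first character of D, recur for remaining substring
-- 	if C and D[0] == C[0]:
-- 		return interleaved(A,B,C[1:],D[1:])
--
--
-- 	return False
-- ===== SOURCE B (Python) =====
-- def interleaved(A, B, C, D):
--     i = j = k = 0
--     for ch in D:
--         if i < len(A) and A[i] == ch:
--             i += 1
--         elif j < len(B) and B[j] == ch:
--             j += 1
--         elif k < len(C) and C[k] == ch:
--             k += 1
--         else:
--             return False
--     return i == len(A) and j == len(B) and k == len(C)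
-- ===== Notes on version B (the rewrite author's own statement) =====
-- stated objective: faster
-- what changed: Replaces the recursive greedy that re-slices all four strings at every step with a single iterative scan of D maintaining three integer pointers into A, B, C (same A>B>C priority, no backtracking).
import Mathlib
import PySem

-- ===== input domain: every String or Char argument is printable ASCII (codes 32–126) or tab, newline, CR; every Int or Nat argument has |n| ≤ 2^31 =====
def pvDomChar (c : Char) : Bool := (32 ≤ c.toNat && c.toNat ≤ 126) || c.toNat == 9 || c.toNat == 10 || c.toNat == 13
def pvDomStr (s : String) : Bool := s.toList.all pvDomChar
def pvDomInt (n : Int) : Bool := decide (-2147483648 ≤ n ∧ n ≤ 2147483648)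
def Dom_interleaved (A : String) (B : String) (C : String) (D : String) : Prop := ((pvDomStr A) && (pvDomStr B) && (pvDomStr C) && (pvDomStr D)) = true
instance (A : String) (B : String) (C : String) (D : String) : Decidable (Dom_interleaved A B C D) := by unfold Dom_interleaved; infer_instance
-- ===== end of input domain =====

-- B replaces A's recursive greedy (which re-slices all four strings each call) with one
-- iterative scan of D holding three integer pointers into A, B, C; same A>B>C priority.

-- ===== PORT A =====
-- literal port of A's recursion, on the strings' character lists
def interleavedRec : List Char → List Char → List Char → List Char → Bool
  | a, b, c, [] =>
      -- "if not A and not B and not C and not D: return True" / "if not D: return False"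
      if a = [] ∧ b = [] ∧ c = [] then true else false
  | a, b, c, x :: d' =>
      match a with
      | ah :: a' =>
        if x = ah then interleavedRec a' b c d'
        else
          match b with
          | bh :: b' =>
            if x = bh then interleavedRec a b' c d'
            else
              match c with
              | ch0 :: c' => if x = ch0 then interleavedRec a b c' d' else false
              | [] => false
          | [] =>
            match c with
            | ch0 :: c' => if x = ch0 then interleavedRec a b c' d' else false
            | [] => false
      | [] =>
        match b with
        | bh :: b' =>
          if x = bh then interleavedRec [] b' c d'
          else
            match c with
            | ch0 :: c' => if x = ch0 then interleavedRec [] b c' d' else false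
            | [] => false
        | [] =>
          match c with
          | ch0 :: c' => if x = ch0 then interleavedRec [] [] c' d' else false
          | [] => false

def interleaved (A : String) (B : String) (C : String) (D : String) : Bool :=
  interleavedRec A.toList B.toList C.toList D.toList

-- ===== PORT B =====
-- literal port of B's for-loop: scan D, advancing index i into a, j into b, k into c
def interleavedLoop (al bl cl : List Char) : List Char → Nat → Nat → Nat → Bool
  | [], i, j, k => decide (i = al.length) && decide (j = bl.length) && decide (k = cl.length)
  | x :: d', i, j, k =>
      if i < al.length ∧ (al[i]? = some x) then interleavedLoop al bl cl d' (i + 1) j k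
      else if j < bl.length ∧ (bl[j]? = some x) then interleavedLoop al bl cl d' i (j + 1) k
      else if k < cl.length ∧ (cl[k]? = some x) then interleavedLoop al bl cl d' i j (k + 1)
      else false

def interleaved_alt (A : String) (B : String) (C : String) (D : String) : Bool :=
  interleavedLoop A.toList B.toList C.toList D.toList 0 0 0

-- ===== PRECONDITION & SPEC =====
def Spec_interleaved (A : String) (B : String) (C : String) (D : String) (out : Bool) : Prop := out = interleaved_alt A B C D
instance (A : String) (B : String) (C : String) (D : String) (out : Bool) : Decidable (Spec_interleaved A B C D out) := by unfold Spec_interleaved; infer_instance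

-- ===== CLAIM (what is proved, stated in full; the proofs are below) =====
def Claim_equal_interleaved : Prop := ∀ (A : String) (B : String) (C : String) (D : String), Dom_interleaved A B C D → Spec_interleaved A B C D (interleaved A B C D)

-- ===== LEMMAS AND PROOFS =====

-- B's loop at pointers (i, j, k) computes A's recursion on the dropped suffixes
theorem loop_eq_rec (d : List Char) : ∀ (al bl cl : List Char) (i j k : Nat),
    i ≤ al.length → j ≤ bl.length → k ≤ cl.length →
    interleavedLoop al bl cl d i j k = interleavedRec (al.drop i) (bl.drop j) (cl.drop k) d := by
  induction d with
  | nil =>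
    intro al bl cl i j k hi hj hk
    simp only [interleavedLoop, interleavedRec, List.drop_eq_nil_iff]
    by_cases h1 : i = al.length <;> by_cases h2 : j = bl.length <;> by_cases h3 : k = cl.length <;>
      simp [h1, h2, h3] <;> omega
  | cons x d' ih =>
    intro al bl cl i j k hi hj hk
    by_cases h1 : i < al.length <;> by_cases h2 : j < bl.length <;> by_cases h3 : k < cl.length <;>
    · first
        | rw [List.drop_eq_getElem_cons h1]
        | rw [List.drop_eq_nil_of_le (by omega : al.length ≤ i)]
      first
        | rw [List.drop_eq_getElem_cons h2]
        | rw [List.drop_eq_nil_of_le (by omega : bl.length ≤ j)]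
      first
        | rw [List.drop_eq_getElem_cons h3]
        | rw [List.drop_eq_nil_of_le (by omega : cl.length ≤ k)]
      simp only [interleavedLoop, interleavedRec]
      first
        | simp only [List.getElem?_eq_getElem h1, h1, Option.some.injEq, true_and]
        | simp only [List.getElem?_eq_none (by omega : al.length ≤ i), h1,
            reduceCtorEq, and_false, if_false]
      first
        | simp only [List.getElem?_eq_getElem h2, h2, Option.some.injEq, true_and]
        | simp only [List.getElem?_eq_none (by omega : bl.length ≤ j), h2,
            reduceCtorEq, and_false, if_false]
      first
        | simp only [List.getElem?_eq_getElem h3, h3, Option.some.injEq, true_and]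
        | simp only [List.getElem?_eq_none (by omega : cl.length ≤ k), h3,
            reduceCtorEq, and_false, if_false]
      try split_ifs
      all_goals try rfl
      all_goals try (refine (ih al bl cl (i + 1) j k (by omega) hj hk).trans ?_
                     congr <;>
                       first
                         | rfl
                         | exact List.drop_eq_nil_of_le (by omega)
                         | exact List.drop_eq_getElem_cons (by omega))
      all_goals try (refine (ih al bl cl i (j + 1) k hi (by omega) hk).trans ?_
                     congr <;>
                       first
                         | rfl
                         | exact List.drop_eq_nil_of_le (by omega)
                         | exact List.drop_eq_getElem_cons (by omega))
      all_goals try (refine (ih al bl cl i j (k + 1) hi hj (by omega)).trans ?_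
                     congr <;>
                       first
                         | rfl
                         | exact List.drop_eq_nil_of_le (by omega)
                         | exact List.drop_eq_getElem_cons (by omega))
      all_goals (clear ih; subst_vars; simp_all)

-- ===== VERDICT (by name: the statement is the Claim_ definition above) =====
theorem interleaved_spec : Claim_equal_interleaved := by
  intro A B C D _
  unfold Spec_interleaved interleaved interleaved_alt
  rw [loop_eq_rec _ _ _ _ 0 0 0 (by omega) (by omega) (by omega)]
  simp
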